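-- pv_equiv track=rewrite | github.com/Shital-Katre/CrowdCount-People-counting | draw_zones.py | corner_hit
-- ===== SOURCE A (Python) =====
-- CORNER_THRESHOLD = 10
--
-- def corner_hit(x, y, z):
--     corners = [
--         (z[0], z[1]),
--         (z[2], z[1]),
--         (z[0], z[3]),
--         (z[2], z[3])
--     ]
--     for i, (cx, cy) in enumerate(corners):
--         if abs(x - cx) <= CORNER_THRESHOLD and abs(y - cy) <= CORNER_THRESHOLD:
--             return i
--     return None
-- ===== SOURCE B (Python) =====
-- CORNER_THRESHOLD = 10
--
-- def corner_hit(x, y, z):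
--     # Resolve each axis independently, then combine into the 2x2 grid index.
--     if abs(x - z[0]) <= CORNER_THRESHOLD:
--         col = 0
--     elif abs(x - z[2]) <= CORNER_THRESHOLD:
--         col = 1
--     else:
--         return None
--     if abs(y - z[1]) <= CORNER_THRESHOLD:
--         row = 0
--     elif abs(y - z[3]) <= CORNER_THRESHOLD:
--         row = 1
--     else:
--         return None
--     return row * 2 + col
-- ===== Notes on version B (the rewrite author's own statement) =====
-- stated objective: simpler
-- what changed: Replaces the 4-corner list and first-match loop by resolving the x-axis and y-axis independently and combining row*2+col, returning None as soon as an axis has no hit.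
import Mathlib
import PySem

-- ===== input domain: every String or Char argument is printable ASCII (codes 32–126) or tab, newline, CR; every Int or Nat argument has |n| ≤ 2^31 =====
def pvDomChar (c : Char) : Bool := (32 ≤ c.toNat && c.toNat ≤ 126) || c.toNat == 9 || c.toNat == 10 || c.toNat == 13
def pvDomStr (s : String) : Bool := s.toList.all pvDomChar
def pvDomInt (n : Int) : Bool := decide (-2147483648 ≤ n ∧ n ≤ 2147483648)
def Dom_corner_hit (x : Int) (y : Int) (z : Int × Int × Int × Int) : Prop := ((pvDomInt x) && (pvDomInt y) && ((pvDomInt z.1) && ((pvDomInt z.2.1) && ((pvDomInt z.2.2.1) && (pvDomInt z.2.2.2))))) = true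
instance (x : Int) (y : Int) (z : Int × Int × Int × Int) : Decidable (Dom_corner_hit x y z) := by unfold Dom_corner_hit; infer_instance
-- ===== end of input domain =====

-- B resolves each axis independently (col then row) instead of scanning the 4-corner list; objective: simpler.
-- ===== PORT A =====
def cornerThreshold : Int := 10

-- the 'for i, (cx, cy) in enumerate(corners)' loop, as structural recursion over the corner list
def cornerScan (x : Int) (y : Int) (i : Int) : List (Int × Int) → Option Int
  | [] => none
  | (cx, cy) :: rest =>
    if |x - cx| ≤ cornerThreshold ∧ |y - cy| ≤ cornerThreshold then some i
    else cornerScan x y (i + 1) rest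

def corner_hit (x : Int) (y : Int) (z : Int × Int × Int × Int) : Option Int :=
  cornerScan x y 0
    [(z.1, z.2.1), (z.2.2.1, z.2.1), (z.1, z.2.2.2), (z.2.2.1, z.2.2.2)]

-- ===== PORT B =====
def corner_hit_alt (x : Int) (y : Int) (z : Int × Int × Int × Int) : Option Int :=
  if |x - z.1| ≤ cornerThreshold then
    (if |y - z.2.1| ≤ cornerThreshold then some (0 * 2 + 0)
     else if |y - z.2.2.2| ≤ cornerThreshold then some (1 * 2 + 0)
     else none)
  else if |x - z.2.2.1| ≤ cornerThreshold then
    (if |y - z.2.1| ≤ cornerThreshold then some (0 * 2 + 1)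
     else if |y - z.2.2.2| ≤ cornerThreshold then some (1 * 2 + 1)
     else none)
  else none

-- ===== PRECONDITION & SPEC =====
def Spec_corner_hit (x : Int) (y : Int) (z : Int × Int × Int × Int) (out : Option Int) : Prop := out = corner_hit_alt x y z
instance (x : Int) (y : Int) (z : Int × Int × Int × Int) (out : Option Int) : Decidable (Spec_corner_hit x y z out) := by unfold Spec_corner_hit; infer_instance

-- ===== CLAIM (what is proved, stated in full; the proofs are below) =====
def Claim_equal_corner_hit : Prop := ∀ (x : Int) (y : Int) (z : Int × Int × Int × Int), Dom_corner_hit x y z → Spec_corner_hit x y z (corner_hit x y z)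

-- ===== LEMMAS AND PROOFS =====

-- ===== VERDICT (by name: the statement is the Claim_ definition above) =====
theorem corner_hit_spec : Claim_equal_corner_hit := by
  intro x y z _
  obtain ⟨z0, z1, z2, z3⟩ := z
  unfold Spec_corner_hit corner_hit corner_hit_alt
  simp only [cornerScan, cornerThreshold]
  split_ifs <;> simp_all
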